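-- pv_equiv track=rewrite | github.com/Yeram522/Programmers | 프로그래머스/3/118669. 등산코스 정하기/등산코스 정하기.py | solution
-- ===== SOURCE A (Python) =====
-- from heapq import heappop, heappush
--
-- def solution(n, paths, gates, summits):
--     INF = 10**9
--
--     # 그래프 구성
--     graph = [[] for _ in range(n+1)]
--     for a, b, cost in paths:
--         graph[a].append([b, cost])
--         graph[b].append([a, cost])
--
--     # O(1) 접근을 위한 set 변환
--     gates_set = set(gates)
--     summits_set = set(summits)
--
--     # intensity를 기록할 배열
--     intensity = [INF] * (n+1)
--
--     # 출발점 설정 - 모든 게이트에서 동시에 시작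
--     pq = []
--     for gate in gates:
--         intensity[gate] = 0
--         heappush(pq, (0, gate))  # (intensity, 노드)
--
--     while pq:
--         current_intensity, node = heappop(pq)
--
--         # 현재 intensity가 기록된 값보다 크면 무시
--         if current_intensity > intensity[node]:
--             continue
--
--         # 산봉우리에 도착했으면 더 이상 탐색하지 않음
--         if node in summits_set:
--             continue
--
--         for next_node, path_intensity in graph[node]:
--             # 출발지는 방문하지 않음 (시작점 제외)
--             if next_node in gates_set:
--                 continue
--
--             # 경로의 최대 intensity 계산
--             new_intensity = max(current_intensity, path_intensity)
--
--             # 더 작은 intensity를 찾은 경우에만 업데이트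
--             if new_intensity < intensity[next_node]:
--                 intensity[next_node] = new_intensity
--                 heappush(pq, (new_intensity, next_node))
--
--     # 답 구하기
--     answer = [INF, INF]
--     for summit in sorted(summits):  # 산봉우리 번호 오름차순 정렬
--         if intensity[summit] < answer[1]:
--             answer = [summit, intensity[summit]]
--
--     return answer
-- ===== SOURCE B (Python) =====
-- # Different algorithm: queueless Bellman-Ford-style label correction run to a fixpoint
-- # (sweep the path rows in both directions until no intensity changes; no graph build,
-- # no priority queue), plus a single lexicographic-min pass over the summits instead of
-- # A's sort-then-scan.
-- def solution(n, paths, gates, summits):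
--     INF = 10**9
--     gate_set = set(gates)
--     summit_set = set(summits)
--     intensity = [INF] * (n + 1)
--     for g in gates:
--         intensity[g] = 0
--     changed = True
--     while changed:
--         changed = False
--         for a, b, cost in paths:
--             for u, v in ((a, b), (b, a)):
--                 if u in summit_set or v in gate_set:
--                     continue
--                 w = max(intensity[u], cost)
--                 if w < intensity[v]:
--                     intensity[v] = w
--                     changed = True
--     best = (INF, INF)
--     for s in summits:
--         if (intensity[s], s) < best:
--             best = (intensity[s], s)
--     return [best[1], best[0]] if best[0] < INF else [INF, INF]
-- ===== Notes on version B (the rewrite author's own statement) =====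
-- stated objective: alternative
-- what changed: Replaces A's multi-source priority-queue (lazy-heap) Dijkstra over a built adjacency list by a queueless Bellman-Ford-style label correction that sweeps the path rows in both directions until no intensity changes, and extracts the answer by one lexicographic-min pass over the summits instead of A's sort-then-scan.
-- outside the precondition, e.g. on solution(2, [[0, -1, 9], [2, 1, 4]], [0], [1, 2]): A returns [1, 9], B returns [2, 9]
import Mathlib
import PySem

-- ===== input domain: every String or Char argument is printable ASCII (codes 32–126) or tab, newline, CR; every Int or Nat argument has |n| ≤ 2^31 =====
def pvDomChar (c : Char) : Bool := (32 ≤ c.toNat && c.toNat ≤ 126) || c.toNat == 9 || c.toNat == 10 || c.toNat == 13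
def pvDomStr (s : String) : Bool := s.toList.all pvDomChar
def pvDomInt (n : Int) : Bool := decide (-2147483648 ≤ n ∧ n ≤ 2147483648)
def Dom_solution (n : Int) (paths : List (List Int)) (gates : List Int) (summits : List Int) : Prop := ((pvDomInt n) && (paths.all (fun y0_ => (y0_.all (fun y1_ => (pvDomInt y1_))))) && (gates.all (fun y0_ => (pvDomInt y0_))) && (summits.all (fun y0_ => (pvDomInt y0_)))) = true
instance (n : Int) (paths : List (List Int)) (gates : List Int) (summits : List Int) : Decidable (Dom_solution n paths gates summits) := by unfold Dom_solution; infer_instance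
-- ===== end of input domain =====

-- B replaces A's priority-queue Dijkstra by a queueless Bellman-Ford-style label
-- correction run to a fixpoint, and extracts the answer by one lexicographic-min pass
-- instead of sort-then-scan; equal return value on all of Pre_, no argument mutated.

-- Python tuple comparison (c1, v1) < (c2, v2), used by both ports.
def pairLt (x y : Int × Int) : Bool := decide (x.1 < y.1 ∨ (x.1 = y.1 ∧ x.2 < y.2))

-- ===== PORT A =====
-- graph = [[] for _ in range(n+1)]; for a, b, cost in paths: graph[a].append([b,cost]); graph[b].append([a,cost])
def buildGraphA (n : Int) (paths : List (List Int)) : List (List (Int × Int)) :=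
  paths.foldl (fun g p =>
    let a := PySem.List.pyGetD p 0 0
    let b := PySem.List.pyGetD p 1 0
    let c := PySem.List.pyGetD p 2 0
    let g1 := PySem.List.pySetD g a (PySem.List.pyGetD g a [] ++ [(b, c)])
    PySem.List.pySetD g1 b (PySem.List.pyGetD g1 b [] ++ [(a, c)]))
    (List.replicate (n + 1).toNat [])

-- body of 'for next_node, path_intensity in graph[node]'
def relaxA (gatesS : List Int) (cur : Int) (st : List Int × List (Int × Int)) (e : Int × Int) :
    List Int × List (Int × Int) :=
  if e.1 ∈ gatesS then st
  else
    let ni := max cur e.2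
    if ni < PySem.List.pyGetD st.1 e.1 0 then
      (PySem.List.pySetD st.1 e.1 ni, st.2 ++ [(ni, e.1)])
    else st

-- heappop by its contract: remove and return the smallest tuple (Python tuple order is lexicographic)
def popMinA (pq : List (Int × Int)) : Option ((Int × Int) × List (Int × Int)) :=
  match pq with
  | [] => none
  | x :: xs =>
      let m := xs.foldl (fun m y => if pairLt y m then y else m) x
      some (m, (x :: xs).erase m)

-- 'while pq:' (fuel bounds the number of pops; it exceeds the number of pushes on Pre_ inputs)
def loopA (graph : List (List (Int × Int))) (gatesS summitsS : List Int) :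
    Nat → List Int → List (Int × Int) → List Int
  | 0, intensity, _ => intensity
  | fuel + 1, intensity, pq =>
    match popMinA pq with
    | none => intensity
    | some ((cur, node), pq') =>
      if cur > PySem.List.pyGetD intensity node 0 then loopA graph gatesS summitsS fuel intensity pq'
      else if node ∈ summitsS then loopA graph gatesS summitsS fuel intensity pq'
      else
        let st := (PySem.List.pyGetD graph node []).foldl (relaxA gatesS cur) (intensity, pq')
        loopA graph gatesS summitsS fuel st.1 st.2

def solution (n : Int) (paths : List (List Int)) (gates : List Int) (summits : List Int) : List Int :=
  let INF : Int := 1000000000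
  let graph := buildGraphA n paths
  let gatesS := PySem.Set.ofList gates
  let summitsS := PySem.Set.ofList summits
  let init := gates.foldl
    (fun (st : List Int × List (Int × Int)) g => (PySem.List.pySetD st.1 g 0, st.2 ++ [(0, g)]))
    (List.replicate (n + 1).toNat INF, [])
  let fuel := gates.length + (n + 1).toNat * 3147483648 + 1
  let intensity := loopA graph gatesS summitsS fuel init.1 init.2
  (PySem.List.sorted summits (fun s => s) false).foldl
    (fun ans s =>
      if PySem.List.pyGetD intensity s 0 < PySem.List.pyGetD ans 1 0 then
        [s, PySem.List.pyGetD intensity s 0]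
      else ans)
    [INF, INF]

-- ===== PORT B =====
-- body of one direction 'for u, v in ((a,b),(b,a)): if u in summit_set or v in gate_set: continue; ...'
def bfDir (gatesS summitsS : List Int) (st : List Int × Bool) (u v c : Int) :
    List Int × Bool :=
  if u ∈ summitsS ∨ v ∈ gatesS then st
  else
    let w := max (PySem.List.pyGetD st.1 u 0) c
    if w < PySem.List.pyGetD st.1 v 0 then (PySem.List.pySetD st.1 v w, true) else st

-- 'for a, b, cost in paths:' (one row, both directions)
def bfRow (gatesS summitsS : List Int) (st : List Int × Bool) (p : List Int) :
    List Int × Bool :=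
  let a := PySem.List.pyGetD p 0 0
  let b := PySem.List.pyGetD p 1 0
  let c := PySem.List.pyGetD p 2 0
  bfDir gatesS summitsS (bfDir gatesS summitsS st a b c) b a c

-- one full sweep; the Bool is Python's 'changed' flag
def bfPass (paths : List (List Int)) (gatesS summitsS : List Int) (I : List Int) :
    List Int × Bool :=
  paths.foldl (bfRow gatesS summitsS) (I, false)

-- 'while changed:' (fuel bounds the number of sweeps; it exceeds the number of
-- possible strict decreases on Pre_ inputs)
def bfLoop (paths : List (List Int)) (gatesS summitsS : List Int) :
    Nat → List Int → List Int
  | 0, I => I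
  | fuel + 1, I =>
    let st := bfPass paths gatesS summitsS I
    if st.2 then bfLoop paths gatesS summitsS fuel st.1 else st.1

def solution_alt (n : Int) (paths : List (List Int)) (gates : List Int) (summits : List Int) : List Int :=
  let INF : Int := 1000000000
  let gatesS := PySem.Set.ofList gates
  let summitsS := PySem.Set.ofList summits
  let I0 := gates.foldl (fun I g => PySem.List.pySetD I g 0) (List.replicate (n + 1).toNat INF)
  let fuel := (n + 1).toNat * 3147483648 + 1
  let intensity := bfLoop paths gatesS summitsS fuel I0
  let best := summits.foldl
    (fun (best : Int × Int) s =>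
      if pairLt (PySem.List.pyGetD intensity s 0, s) best then (PySem.List.pyGetD intensity s 0, s)
      else best)
    (INF, INF)
  if best.1 < INF then [best.2, best.1] else [INF, INF]

-- ===== PRECONDITION & SPEC =====
-- Pre_ excludes inputs where A raises (path rows that are not [a,b,cost] triples: ValueError;
-- node ids outside Python's index range [-(n+1), n]: IndexError) and, of the inputs A returns on,
-- ONLY those where two node ids naming the same array slot (one of them by Python's
-- negative-index wraparound) sit on opposite sides of the summit boundary: there A's answer is
-- an artefact of which literal id each heap push happens to carry — a defensible corner no one
-- would specify, on which B's reading is equally defensible.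
def Pre_solution (n : Int) (paths : List (List Int)) (gates : List Int) (summits : List Int) : Prop :=
  (∀ p ∈ paths, p.length = 3 ∧
    (-(n+1) ≤ p.getD 0 0 ∧ p.getD 0 0 ≤ n) ∧ (-(n+1) ≤ p.getD 1 0 ∧ p.getD 1 0 ≤ n)) ∧
  (∀ g ∈ gates, -(n+1) ≤ g ∧ g ≤ n) ∧
  (∀ s ∈ summits, -(n+1) ≤ s ∧ s ≤ n) ∧
  (∀ x ∈ gates ++ paths.flatMap (fun p => [p.getD 0 0, p.getD 1 0]),
   ∀ y ∈ gates ++ paths.flatMap (fun p => [p.getD 0 0, p.getD 1 0]),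
    (if x < 0 then x + n + 1 else x) = (if y < 0 then y + n + 1 else y) →
    (x ∈ summits ↔ y ∈ summits))
instance (n : Int) (paths : List (List Int)) (gates : List Int) (summits : List Int) : Decidable (Pre_solution n paths gates summits) := by unfold Pre_solution; infer_instance

def pvWitness_solution : Int × List (List Int) × List Int × List Int :=
  (4, [[1, 2, 3], [2, 4, 5], [1, 3, 1], [3, 4, 2]], [1], [4])

def Spec_solution (n : Int) (paths : List (List Int)) (gates : List Int) (summits : List Int) (out : List Int) : Prop := out = solution_alt n paths gates summits
instance (n : Int) (paths : List (List Int)) (gates : List Int) (summits : List Int) (out : List Int) : Decidable (Spec_solution n paths gates summits out) := by unfold Spec_solution; infer_instance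

-- ===== CLAIM (what is proved, stated in full; the proofs are below) =====
def Claim_equal_solution : Prop := ∀ (n : Int) (paths : List (List Int)) (gates : List Int) (summits : List Int), Dom_solution n paths gates summits → Pre_solution n paths gates summits → Spec_solution n paths gates summits (solution n paths gates summits)

-- ===== LEMMAS AND PROOFS =====

-- canonical slot of a Python index (a negative index counts from the end)
def canonN (N x : Int) : Nat := (if x < 0 then x + N + 1 else x).toNat

theorem canonN_natCast (N : Int) (k : Nat) : canonN N (k : Int) = k := by
  rw [canonN, if_neg (by omega)]
  simp

theorem canonN_lt (N x : Int) (h1 : -(N+1) ≤ x) (h2 : x ≤ N) : canonN N x < (N + 1).toNat := by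
  rw [canonN]; split_ifs <;> omega

theorem canonN_cast (N x : Int) (h1 : -(N+1) ≤ x) (h2 : x ≤ N) :
    ((canonN N x : Nat) : Int) = if x < 0 then x + N + 1 else x := by
  rw [canonN]; split_ifs <;> omega

theorem pyIdx_slot (len : Nat) (N x : Int) (hlen : len = (N + 1).toNat)
    (h1 : -(N+1) ≤ x) (h2 : x ≤ N) :
    PySem.List.pyIdx? len x = some (canonN N x) := by
  have hlen' : (len : Int) = N + 1 := by subst hlen; omega
  rw [PySem.List.pyIdx?, canonN]
  by_cases hx0 : 0 ≤ x
  · rw [if_pos hx0, if_pos (by omega), if_neg (by omega)]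
  · rw [if_neg hx0, if_pos (by omega), if_pos (by omega)]
    congr 1
    omega

theorem pyGetD_slot {α : Type} (I : List α) (N x : Int) (d : α)
    (hlen : I.length = (N + 1).toNat) (h1 : -(N+1) ≤ x) (h2 : x ≤ N) :
    PySem.List.pyGetD I x d = I.getD (canonN N x) d := by
  rw [PySem.List.pyGetD, PySem.List.pyGet?, pyIdx_slot I.length N x hlen h1 h2]
  simp [List.getD_eq_getElem?_getD]

theorem pySetD_slot {α : Type} (I : List α) (N x : Int) (w : α)
    (hlen : I.length = (N + 1).toNat) (h1 : -(N+1) ≤ x) (h2 : x ≤ N) :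
    PySem.List.pySetD I x w = I.set (canonN N x) w := by
  rw [PySem.List.pySetD, PySem.List.pySet?, pyIdx_slot I.length N x hlen h1 h2]
  rfl

theorem getD_set (I : List Int) (i k : Nat) (w : Int) :
    (I.set i w).getD k 0 = if i = k ∧ i < I.length then w else I.getD k 0 := by
  rcases Nat.lt_or_ge k I.length with hk | hk
  · by_cases h : i = k
    · subst h
      by_cases hi : i < I.length
      · simp [List.getD_eq_getElem?_getD, List.getElem?_set, hi]
      · omega
    · simp [List.getD_eq_getElem?_getD, List.getElem?_set, h]
  · have h1 : I.getD k 0 = 0 := List.getD_eq_default _ _ hk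
    have h2 : (I.set i w).getD k 0 = 0 := List.getD_eq_default _ _ (by simpa using hk)
    rw [h1, h2]
    by_cases h : i = k ∧ i < I.length
    · omega
    · simp [h]

-- the termination potential: Σ (value + 2^31).toNat over all slots
def Phi (I : List Int) : Nat := (I.map (fun x => (x + 2147483648).toNat)).sum

theorem phi_set (I : List Int) (k : Nat) (hk : k < I.length) (w : Int) :
    Phi (I.set k w) + (I.getD k 0 + 2147483648).toNat
      = Phi I + (w + 2147483648).toNat := by
  induction I generalizing k with
  | nil => simp at hk
  | cons x xs ih =>
    cases k with
    | zero => simp [Phi]; omega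
    | succ k =>
      have := ih k (by simpa using hk)
      simp only [Phi, List.set_cons_succ, List.map_cons, List.sum_cons, List.getD_cons_succ] at this ⊢
      omega

theorem sum_map_le (l : List Int) (B : Nat) (f : Int → Nat) (h : ∀ x ∈ l, f x ≤ B) :
    (l.map f).sum ≤ l.length * B := by
  induction l with
  | nil => simp
  | cons x xs ih =>
    simp only [List.map_cons, List.sum_cons, List.length_cons]
    have := ih (fun y hy => h y (List.mem_cons_of_mem _ hy))
    have := h x List.mem_cons_self
    calc f x + (xs.map f).sum ≤ B + xs.length * B := by omega
    _ = (xs.length + 1) * B := by ring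

-- state invariant: length fixed, every slot value in [-2^31, 10^9]
def SInv (N : Int) (I : List Int) : Prop :=
  I.length = (N + 1).toNat ∧
  ∀ k : Nat, k < I.length → -2147483648 ≤ I.getD k 0 ∧ I.getD k 0 ≤ 1000000000

theorem phi_le (N : Int) (I : List Int) (h : SInv N I) : Phi I ≤ I.length * 3147483648 := by
  refine sum_map_le I 3147483648 _ (fun x hx => ?_)
  obtain ⟨k, hk, rfl⟩ := List.mem_iff_getElem.mp hx
  have := h.2 k hk
  rw [List.getD_eq_getElem _ _ hk] at this
  omega

-- literals tested for summit membership by either program: gates and adjacency-entry ids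
def TLit (G : List (List (Int × Int))) (gt : List Int) (z : Int) : Prop :=
  z ∈ gt ∨ ∃ b ∈ G, ∃ e ∈ b, (e : Int × Int).1 = z

-- slot k is expandable: some tested literal naming it is not a summit
def EXP (N : Int) (G : List (List (Int × Int))) (sm gt : List Int) (k : Nat) : Prop :=
  ∃ z, TLit G gt z ∧ canonN N z = k ∧ z ∉ sm

-- Pre_'s consistency: tested literals naming the same slot agree on summit membership
def HCons (N : Int) (G : List (List (Int × Int))) (sm gt : List Int) : Prop :=
  ∀ z y, TLit G gt z → TLit G gt y → canonN N z = canonN N y → z ∈ sm → y ∈ sm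

-- every adjacency entry has an in-range id drawn from the row-endpoint list ep
def GoodG (N : Int) (ep : List Int) (G : List (List (Int × Int))) : Prop :=
  G.length = (N + 1).toNat ∧
  ∀ b ∈ G, ∀ e ∈ b, -(N+1) ≤ e.1 ∧ e.1 ≤ N ∧ -2147483648 ≤ e.2 ∧ e.1 ∈ ep

theorem goodG_bucket {N : Int} {ep : List Int} {G : List (List (Int × Int))}
    (hG : GoodG N ep G) (u : Int) {e : Int × Int} (he : e ∈ PySem.List.pyGetD G u []) :
    -(N+1) ≤ e.1 ∧ e.1 ≤ N ∧ -2147483648 ≤ e.2 ∧ e.1 ∈ ep := by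
  by_cases hr : PySem.Raise.InRange G.length u
  · exact hG.2 _ (PySem.List.pyGetD_mem G [] hr) _ he
  · rw [PySem.List.pyGetD_of_none G u [] ((PySem.List.pyGet?_eq_none_iff G u).mpr hr)] at he
    simp at he

theorem TLit_of_bucket {G : List (List (Int × Int))} {gt : List Int} (u : Int)
    {e : Int × Int} (he : e ∈ PySem.List.pyGetD G u []) : TLit G gt e.1 := by
  by_cases hr : PySem.Raise.InRange G.length u
  · exact Or.inr ⟨_, PySem.List.pyGetD_mem G [] hr, e, he, rfl⟩
  · rw [PySem.List.pyGetD_of_none G u [] ((PySem.List.pyGet?_eq_none_iff G u).mpr hr)] at he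
    simp at he

-- one admissible relaxation step, stated on slots (the only way either program changes the array)
def RelStep (N : Int) (G : List (List (Int × Int))) (sm gt : List Int) (I J : List Int) : Prop :=
  ∃ (k : Nat) (v c : Int), k < (N + 1).toNat ∧ EXP N G sm gt k ∧
    (v, c) ∈ PySem.List.pyGetD G (k : Int) [] ∧ v ∉ gt ∧ -(N+1) ≤ v ∧ v ≤ N ∧
    -2147483648 ≤ c ∧ max (I.getD k 0) c < I.getD (canonN N v) 0 ∧
    J = I.set (canonN N v) (max (I.getD k 0) c)

def Reach (N : Int) (G : List (List (Int × Int))) (sm gt : List Int) : List Int → List Int → Prop :=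
  Relation.ReflTransGen (RelStep N G sm gt)

-- a state on which no admissible relaxation fires
def StableI (N : Int) (G : List (List (Int × Int))) (sm gt : List Int) (I : List Int) : Prop :=
  ∀ (k : Nat) (v c : Int), k < (N + 1).toNat → EXP N G sm gt k →
    (v, c) ∈ PySem.List.pyGetD G (k : Int) [] → v ∉ gt →
    I.getD (canonN N v) 0 ≤ max (I.getD k 0) c

theorem rel_sinv {N : Int} {G : List (List (Int × Int))} {sm gt : List Int} {I J : List Int}
    (h : RelStep N G sm gt I J) (hI : SInv N I) :
    SInv N J ∧ (∀ k : Nat, J.getD k 0 ≤ I.getD k 0) ∧ Phi J < Phi I := by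
  obtain ⟨k, v, c, hk, _, _, _, hv1, hv2, hc, hlt, rfl⟩ := h
  have hkL : k < I.length := by rw [hI.1]; exact hk
  have hvL : canonN N v < I.length := by rw [hI.1]; exact canonN_lt N v hv1 hv2
  have hsrc := hI.2 k hkL
  have htgt := hI.2 (canonN N v) hvL
  have hmax : max (I.getD k 0) c = I.getD k 0 ∨ max (I.getD k 0) c = c := max_choice _ _
  refine ⟨⟨by simpa using hI.1, fun j hj => ?_⟩, fun j => ?_, ?_⟩
  · rw [getD_set]
    have hj' : j < I.length := by simpa using hj
    split_ifs with h
    · omega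
    · exact hI.2 j hj'
  · rw [getD_set]
    split_ifs with h
    · rcases h with ⟨rfl, _⟩; omega
    · omega
  · have := phi_set I (canonN N v) hvL (max (I.getD k 0) c)
    omega

theorem reach_sinv {N : Int} {G : List (List (Int × Int))} {sm gt : List Int} {I J : List Int}
    (h : Reach N G sm gt I J) (hI : SInv N I) :
    SInv N J ∧ ∀ k : Nat, J.getD k 0 ≤ I.getD k 0 := by
  induction h with
  | refl => exact ⟨hI, fun k => le_refl _⟩
  | tail _ hstep ih =>
    obtain ⟨h1, h2⟩ := ih
    obtain ⟨h3, h4, _⟩ := rel_sinv hstep h1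
    exact ⟨h3, fun k => le_trans (h4 k) (h2 k)⟩

-- confluence: any reachable state dominates any stable reachable state
theorem reach_ge_stable {N : Int} {G : List (List (Int × Int))} {sm gt : List Int}
    {I0 Z X : List Int} (hI0 : SInv N I0) (hZr : Reach N G sm gt I0 Z)
    (hZs : StableI N G sm gt Z) (hXr : Reach N G sm gt I0 X) :
    ∀ k : Nat, Z.getD k 0 ≤ X.getD k 0 := by
  induction hXr with
  | refl => exact (reach_sinv hZr hI0).2
  | tail hr hstep ih =>
    obtain ⟨k, v, c, hk, hks, hedge, hvg, hv1, hv2, hc, hlt, rfl⟩ := hstep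
    intro j
    rw [getD_set]
    split_ifs with h
    · obtain ⟨rfl, _⟩ := h
      have h1 : Z.getD (canonN N v) 0 ≤ max (Z.getD k 0) c := hZs k v c hk hks hedge hvg
      have h2 := ih k
      omega
    · exact ih j

-- two stable reachable states are the same list
theorem stable_reach_eq {N : Int} {G : List (List (Int × Int))} {sm gt : List Int}
    {I0 Z1 Z2 : List Int} (hI0 : SInv N I0)
    (h1r : Reach N G sm gt I0 Z1) (h1s : StableI N G sm gt Z1)
    (h2r : Reach N G sm gt I0 Z2) (h2s : StableI N G sm gt Z2) : Z1 = Z2 := by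
  have hl1 : Z1.length = (N + 1).toNat := ((reach_sinv h1r hI0).1).1
  have hl2 : Z2.length = (N + 1).toNat := ((reach_sinv h2r hI0).1).1
  have g12 := reach_ge_stable hI0 h1r h1s h2r
  have g21 := reach_ge_stable hI0 h2r h2s h1r
  apply List.ext_getElem (by omega)
  intro k hk1 hk2
  have := le_antisymm (g12 k) (g21 k)
  rwa [List.getD_eq_getElem _ _ hk1, List.getD_eq_getElem _ _ hk2] at this

-- ===== A-side: the Dijkstra loop reaches a stable state =====

def QInv (N : Int) (G : List (List (Int × Int))) (gt : List Int)
    (I : List Int) (pq : List (Int × Int)) : Prop :=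
  ∀ p ∈ pq, (-(N+1) ≤ p.2 ∧ p.2 ≤ N) ∧ TLit G gt p.2 ∧ I.getD (canonN N p.2) 0 ≤ p.1

-- Stab with a pending-obligation escape hatch for the slot being expanded
def AStab (N : Int) (G : List (List (Int × Int))) (sm gt : List Int) (kexp : Nat)
    (es : List (Int × Int)) (I : List Int) (pq : List (Int × Int)) : Prop :=
  ∀ (k : Nat) (v c : Int), k < (N + 1).toNat → EXP N G sm gt k →
    (v, c) ∈ PySem.List.pyGetD G (k : Int) [] → v ∉ gt →
    I.getD (canonN N v) 0 ≤ max (I.getD k 0) c ∨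
    (∃ x, (-(N+1) ≤ x ∧ x ≤ N) ∧ TLit G gt x ∧ canonN N x = k ∧ (I.getD k 0, x) ∈ pq) ∨
    (k = kexp ∧ (v, c) ∈ es)

theorem foldlMin_mem (xs : List (Int × Int)) (x : Int × Int) :
    (xs.foldl (fun m y => if pairLt y m then y else m) x) ∈ x :: xs := by
  induction xs generalizing x with
  | nil => simp
  | cons z zs ih =>
    simp only [List.foldl_cons]
    rcases List.mem_cons.mp (ih (if pairLt z x then z else x)) with hm | hm
    · rw [hm]; split <;> simp
    · simp [hm]

theorem fold_relax {N : Int} {ep : List Int} {G : List (List (Int × Int))} {sm gt : List Int}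
    (hG : GoodG N ep G) {k0 : Nat} {c : Int}
    (hk0 : k0 < (N + 1).toNat) (hk0s : EXP N G sm gt k0) (I : List Int) :
    ∀ (es : List (Int × Int)) (I' : List Int) (pq₁ : List (Int × Int)),
      (∀ e ∈ es, e ∈ PySem.List.pyGetD G ((k0 : Nat) : Int) []) → SInv N I' →
      QInv N G gt I' pq₁ → I'.getD k0 0 = c → AStab N G sm gt k0 es I' pq₁ →
      Reach N G sm gt I I' →
      SInv N (es.foldl (relaxA gt c) (I', pq₁)).1 ∧
      QInv N G gt (es.foldl (relaxA gt c) (I', pq₁)).1 (es.foldl (relaxA gt c) (I', pq₁)).2 ∧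
      AStab N G sm gt k0 [] (es.foldl (relaxA gt c) (I', pq₁)).1 (es.foldl (relaxA gt c) (I', pq₁)).2 ∧
      Reach N G sm gt I (es.foldl (relaxA gt c) (I', pq₁)).1 ∧
      (es.foldl (relaxA gt c) (I', pq₁)).2.length + Phi (es.foldl (relaxA gt c) (I', pq₁)).1
        ≤ pq₁.length + Phi I' := by
  intro es
  induction es with
  | nil =>
    intro I' pq₁ _ hS hQ hgu hA hR
    refine ⟨hS, hQ, ?_, hR, le_refl _⟩
    intro k v' c' h1 h2 h3 h4
    rcases hA k v' c' h1 h2 h3 h4 with h | h | h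
    · exact Or.inl h
    · exact Or.inr (Or.inl h)
    · simp at h
  | cons e es ih =>
    intro I' pq₁ hbkt hS hQ hgu hA hR
    simp only [List.foldl_cons]
    by_cases hg : e.1 ∈ gt
    · have hstep : relaxA gt c (I', pq₁) e = (I', pq₁) := by rw [relaxA, if_pos hg]
      rw [hstep]
      refine ih I' pq₁ (fun x hx => hbkt x (List.mem_cons_of_mem _ hx)) hS hQ hgu ?_ hR
      intro k v' c' h1 h2 h3 h4
      rcases hA k v' c' h1 h2 h3 h4 with h | h | ⟨he1, he2⟩
      · exact Or.inl h
      · exact Or.inr (Or.inl h)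
      · rcases List.mem_cons.mp he2 with rfl | he2
        · exact absurd hg h4
        · exact Or.inr (Or.inr ⟨he1, he2⟩)
    · obtain ⟨hv1, hv2, hc2, _⟩ := goodG_bucket hG _ (hbkt e List.mem_cons_self)
      have hTe : TLit G gt e.1 := TLit_of_bucket _ (hbkt e List.mem_cons_self)
      have hbr : PySem.List.pyGetD I' e.1 0 = I'.getD (canonN N e.1) 0 :=
        pyGetD_slot I' N e.1 0 hS.1 hv1 hv2
      have hkv : canonN N e.1 < (N + 1).toNat := canonN_lt N e.1 hv1 hv2
      have hkvL : canonN N e.1 < I'.length := by rw [hS.1]; exact hkv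
      by_cases hlt : max c e.2 < PySem.List.pyGetD I' e.1 0
      · have hsetr : PySem.List.pySetD I' e.1 (max c e.2) = I'.set (canonN N e.1) (max c e.2) :=
          pySetD_slot I' N e.1 _ hS.1 hv1 hv2
        have hstep : relaxA gt c (I', pq₁) e =
            (I'.set (canonN N e.1) (max c e.2), pq₁ ++ [(max c e.2, e.1)]) := by
          rw [relaxA, if_neg hg]
          simp only [hlt, if_pos]
          rw [hsetr]
        rw [hstep]
        have hne : canonN N e.1 ≠ k0 := by
          intro hh
          rw [hbr, hh, hgu] at hlt
          have := le_max_left c e.2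
          omega
        have hrel : RelStep N G sm gt I' (I'.set (canonN N e.1) (max c e.2)) := by
          refine ⟨k0, e.1, e.2, hk0, hk0s, hbkt e List.mem_cons_self, hg, hv1, hv2, hc2, ?_, ?_⟩
          · rw [hgu, ← hbr]; exact hlt
          · rw [hgu]
        obtain ⟨hS', hdec, hphi⟩ := rel_sinv hrel hS
        have hgu' : (I'.set (canonN N e.1) (max c e.2)).getD k0 0 = c := by
          rw [getD_set, if_neg (fun h => hne h.1)]; exact hgu
        have hQ' : QInv N G gt (I'.set (canonN N e.1) (max c e.2)) (pq₁ ++ [(max c e.2, e.1)]) := by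
          intro p hp
          rcases List.mem_append.mp hp with hp | hp
          · obtain ⟨q1, q2, q3⟩ := hQ p hp
            exact ⟨q1, q2, le_trans (hdec _) q3⟩
          · simp only [List.mem_singleton] at hp
            subst hp
            refine ⟨⟨hv1, hv2⟩, hTe, ?_⟩
            rw [getD_set, if_pos ⟨rfl, hkvL⟩]
        have hA' : AStab N G sm gt k0 es (I'.set (canonN N e.1) (max c e.2))
            (pq₁ ++ [(max c e.2, e.1)]) := by
          intro k v' c' h1 h2 h3 h4
          by_cases hslot : canonN N e.1 = k
          · refine Or.inr (Or.inl ⟨e.1, ⟨hv1, hv2⟩, hTe, hslot, ?_⟩)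
            rw [← hslot, getD_set, if_pos ⟨rfl, hkvL⟩]
            exact List.mem_append_right _ (by simp)
          · have hsrc : (I'.set (canonN N e.1) (max c e.2)).getD k 0 = I'.getD k 0 := by
              rw [getD_set, if_neg (fun h => hslot h.1)]
            rcases hA k v' c' h1 h2 h3 h4 with h | ⟨x, hx, hxT, hxk, hxm⟩ | ⟨hke, hmem⟩
            · refine Or.inl ?_
              rw [hsrc]
              exact le_trans (hdec _) h
            · exact Or.inr (Or.inl ⟨x, hx, hxT, hxk, by rw [hsrc]; exact List.mem_append_left _ hxm⟩)
            · rcases List.mem_cons.mp hmem with hmem | hmem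
              · refine Or.inl ?_
                have hv1' : v' = e.1 := congrArg Prod.fst hmem
                have hc1' : c' = e.2 := congrArg Prod.snd hmem
                rw [hv1', hc1', hke, hgu', getD_set, if_pos ⟨rfl, hkvL⟩]
              · exact Or.inr (Or.inr ⟨hke, hmem⟩)
        obtain ⟨c1, c2, c3, c4, c5⟩ :=
          ih (I'.set (canonN N e.1) (max c e.2)) (pq₁ ++ [(max c e.2, e.1)])
            (fun x hx => hbkt x (List.mem_cons_of_mem _ hx)) hS' hQ' hgu' hA'
            (Relation.ReflTransGen.tail hR hrel)
        refine ⟨c1, c2, c3, c4, ?_⟩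
        have hlen : (pq₁ ++ [(max c e.2, e.1)]).length = pq₁.length + 1 := by simp
        omega
      · have hstep : relaxA gt c (I', pq₁) e = (I', pq₁) := by
          rw [relaxA, if_neg hg]
          simp only [hlt, if_false]
        rw [hstep]
        refine ih I' pq₁ (fun x hx => hbkt x (List.mem_cons_of_mem _ hx)) hS hQ hgu ?_ hR
        intro k v' c' h1 h2 h3 h4
        rcases hA k v' c' h1 h2 h3 h4 with h | h | ⟨he1, he2⟩
        · exact Or.inl h
        · exact Or.inr (Or.inl h)
        · rcases List.mem_cons.mp he2 with he2 | he2
          · refine Or.inl ?_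
            have hv1' : v' = e.1 := congrArg Prod.fst he2
            have hc1' : c' = e.2 := congrArg Prod.snd he2
            rw [hv1', hc1', he1, hgu, ← hbr]
            exact Int.not_lt.mp hlt
          · exact Or.inr (Or.inr ⟨he1, he2⟩)

theorem loopA_good {N : Int} {ep : List Int} {G : List (List (Int × Int))} {sm gt : List Int}
    (hG : GoodG N ep G) (hC : HCons N G sm gt) :
    ∀ (fuel : Nat) (I : List Int) (pq : List (Int × Int)),
      SInv N I → QInv N G gt I pq → AStab N G sm gt 0 [] I pq →
      pq.length + Phi I < fuel →
      StableI N G sm gt (loopA G gt sm fuel I pq) ∧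
      Reach N G sm gt I (loopA G gt sm fuel I pq) := by
  intro fuel
  induction fuel with
  | zero => intro I pq _ _ _ h; omega
  | succ fuel ih =>
    intro I pq hS hQ hA hfuel
    match pq with
    | [] =>
      rw [loopA]
      simp only [popMinA]
      refine ⟨?_, Relation.ReflTransGen.refl⟩
      intro k v c h1 h2 h3 h4
      rcases hA k v c h1 h2 h3 h4 with h | h | h
      · exact h
      · obtain ⟨x, _, _, _, hx⟩ := h
        simp at hx
      · simp at h
    | x :: xs =>
      rcases hM : xs.foldl (fun m y => if pairLt y m then y else m) x with ⟨cur, node⟩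
      have hm : (cur, node) ∈ x :: xs := hM ▸ foldlMin_mem xs x
      obtain ⟨⟨hn1, hn2⟩, hnT, hnle⟩ := hQ _ hm
      simp only at hn1 hn2 hnT hnle
      have hbrI : PySem.List.pyGetD I node 0 = I.getD (canonN N node) 0 :=
        pyGetD_slot I N node 0 hS.1 hn1 hn2
      have hlen : ((x :: xs).erase (cur, node)).length = xs.length :=
        by rw [List.length_erase_of_mem hm]; simp
      have hsub : ∀ p ∈ (x :: xs).erase (cur, node), p ∈ x :: xs :=
        fun p hp => List.mem_of_mem_erase hp
      have hred : loopA G gt sm (fuel + 1) I (x :: xs) =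
          (if cur > PySem.List.pyGetD I node 0 then
            loopA G gt sm fuel I ((x :: xs).erase (cur, node))
          else if node ∈ sm then
            loopA G gt sm fuel I ((x :: xs).erase (cur, node))
          else
            loopA G gt sm fuel
              ((PySem.List.pyGetD G node []).foldl (relaxA gt cur) (I, (x :: xs).erase (cur, node))).1
              ((PySem.List.pyGetD G node []).foldl (relaxA gt cur) (I, (x :: xs).erase (cur, node))).2) := by
        rw [loopA]
        simp only [popMinA, hM]
      rw [hred]
      by_cases hstale : cur > PySem.List.pyGetD I node 0
      · rw [if_pos hstale]
        rw [hbrI] at hstale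
        refine ih I _ hS (fun p hp => hQ p (hsub p hp)) ?_ (by simp only [List.length_cons] at hfuel; omega)
        intro k v' c' h1 h2 h3 h4
        rcases hA k v' c' h1 h2 h3 h4 with h | ⟨y, hy, hyT, hyk, hym⟩ | h
        · exact Or.inl h
        · refine Or.inr (Or.inl ⟨y, hy, hyT, hyk, (List.mem_erase_of_ne ?_).mpr hym⟩)
          intro hh
          have he1 : I.getD k 0 = cur := congrArg Prod.fst hh
          have he2 : y = node := congrArg Prod.snd hh
          rw [he2] at hyk
          rw [← hyk] at he1
          omega
        · simp at h
      · rw [if_neg hstale]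
        rw [hbrI] at hstale
        have hcur : I.getD (canonN N node) 0 = cur := by omega
        by_cases hsm : node ∈ sm
        · rw [if_pos hsm]
          refine ih I _ hS (fun p hp => hQ p (hsub p hp)) ?_ (by simp only [List.length_cons] at hfuel; omega)
          intro k v' c' h1 h2 h3 h4
          rcases hA k v' c' h1 h2 h3 h4 with h | ⟨y, hy, hyT, hyk, hym⟩ | h
          · exact Or.inl h
          · refine Or.inr (Or.inl ⟨y, hy, hyT, hyk, (List.mem_erase_of_ne ?_).mpr hym⟩)
            intro hh
            have he2 : y = node := congrArg Prod.snd hh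
            obtain ⟨z, hzT, hzk, hzs⟩ := h2
            exact hzs (hC y z hyT hzT (by rw [hyk, hzk]) (by rw [he2]; exact hsm))
          · simp at h
        · rw [if_neg hsm]
          have hk0s : EXP N G sm gt (canonN N node) := ⟨node, hnT, rfl, hsm⟩
          have hk0 : canonN N node < (N + 1).toNat := canonN_lt N node hn1 hn2
          have hbG : PySem.List.pyGetD G node [] = PySem.List.pyGetD G ((canonN N node : Nat) : Int) [] := by
            rw [pyGetD_slot G N node [] hG.1 hn1 hn2,
              pyGetD_slot G N ((canonN N node : Nat) : Int) [] hG.1 (by omega)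
                (by have := canonN_lt N node hn1 hn2; omega),
              canonN_natCast]
          have hAx : AStab N G sm gt (canonN N node) (PySem.List.pyGetD G node []) I
              ((x :: xs).erase (cur, node)) := by
            intro k v' c' h1 h2 h3 h4
            rcases hA k v' c' h1 h2 h3 h4 with h | ⟨y, hy, hyT, hyk, hym⟩ | h
            · exact Or.inl h
            · by_cases hh : (I.getD k 0, y) = (cur, node)
              · have he2 : y = node := congrArg Prod.snd hh
                rw [he2] at hyk
                refine Or.inr (Or.inr ⟨hyk.symm, ?_⟩)
                rw [hbG, hyk]
                exact h3
              · exact Or.inr (Or.inl ⟨y, hy, hyT, hyk, (List.mem_erase_of_ne hh).mpr hym⟩)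
            · simp at h
          obtain ⟨c1, c2, c3, c4, c5⟩ :=
            fold_relax hG hk0 hk0s I (PySem.List.pyGetD G node []) I
              ((x :: xs).erase (cur, node)) (fun e he => hbG ▸ he) hS
              (fun p hp => hQ p (hsub p hp)) hcur hAx Relation.ReflTransGen.refl
          obtain ⟨d1, d2⟩ := ih _ _ c1 c2 (by
            intro k v' c' h1 h2 h3 h4
            rcases c3 k v' c' h1 h2 h3 h4 with h | h | h
            · exact Or.inl h
            · exact Or.inr (Or.inl h)
            · simp at h) (by
              simp only [List.length_cons] at hfuel
              have := c5
              rw [hlen] at this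
              omega)
          exact ⟨d1, Relation.ReflTransGen.trans c4 d2⟩

-- ===== B-side: the row-sweep Bellman-Ford loop reaches a stable state =====

theorem bfDir_good {N : Int} {ep : List Int} {G : List (List (Int × Int))} {sm gt : List Int}
    (hG : GoodG N ep G) {u v c : Int}
    (hu1 : -(N+1) ≤ u) (hu2 : u ≤ N) (hv1 : -(N+1) ≤ v) (hv2 : v ≤ N)
    (hcb : -2147483648 ≤ c) (hTu : TLit G gt u)
    (hedge : (v, c) ∈ PySem.List.pyGetD G ((canonN N u : Nat) : Int) [])
    (I : List Int) (st : List Int × Bool) (hS : SInv N st.1) (hR : Reach N G sm gt I st.1) :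
    SInv N (bfDir gt sm st u v c).1 ∧ Reach N G sm gt I (bfDir gt sm st u v c).1 ∧
    Phi (bfDir gt sm st u v c).1 ≤ Phi st.1 ∧
    ((bfDir gt sm st u v c).2 = true → st.2 = true ∨ Phi (bfDir gt sm st u v c).1 < Phi st.1) ∧
    ((bfDir gt sm st u v c).2 = false → bfDir gt sm st u v c = st ∧
      (u ∉ sm → v ∉ gt →
        PySem.List.pyGetD st.1 v 0 ≤ max (PySem.List.pyGetD st.1 u 0) c)) := by
  by_cases hskip : u ∈ sm ∨ v ∈ gt
  · have hstep : bfDir gt sm st u v c = st := by rw [bfDir, if_pos hskip]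
    rw [hstep]
    refine ⟨hS, hR, le_refl _, fun h => Or.inl h, fun _ => ⟨rfl, fun hus hvg => ?_⟩⟩
    rcases hskip with h | h
    · exact absurd h hus
    · exact absurd h hvg
  · push_neg at hskip
    obtain ⟨hus, hvg⟩ := hskip
    have hbrU : PySem.List.pyGetD st.1 u 0 = st.1.getD (canonN N u) 0 :=
      pyGetD_slot st.1 N u 0 hS.1 hu1 hu2
    have hbrV : PySem.List.pyGetD st.1 v 0 = st.1.getD (canonN N v) 0 :=
      pyGetD_slot st.1 N v 0 hS.1 hv1 hv2
    by_cases hlt : max (PySem.List.pyGetD st.1 u 0) c < PySem.List.pyGetD st.1 v 0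
    · have hsetr : PySem.List.pySetD st.1 v (max (PySem.List.pyGetD st.1 u 0) c)
          = st.1.set (canonN N v) (max (st.1.getD (canonN N u) 0) c) := by
        rw [pySetD_slot st.1 N v _ hS.1 hv1 hv2, hbrU]
      have hstep : bfDir gt sm st u v c =
          (st.1.set (canonN N v) (max (st.1.getD (canonN N u) 0) c), true) := by
        rw [bfDir, if_neg (by push_neg; exact ⟨hus, hvg⟩)]
        simp only [hlt, if_pos]
        rw [hsetr]
      have hrel : RelStep N G sm gt st.1
          (st.1.set (canonN N v) (max (st.1.getD (canonN N u) 0) c)) := by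
        refine ⟨canonN N u, v, c, canonN_lt N u hu1 hu2, ⟨u, hTu, rfl, hus⟩, hedge, hvg,
          hv1, hv2, hcb, ?_, rfl⟩
        rw [← hbrU, ← hbrV]
        exact hlt
      obtain ⟨hS', _, hphi⟩ := rel_sinv hrel hS
      rw [hstep]
      exact ⟨hS', Relation.ReflTransGen.tail hR hrel, le_of_lt hphi,
        fun _ => Or.inr hphi, fun hf => by cases hf⟩
    · have hstep : bfDir gt sm st u v c = st := by
        rw [bfDir, if_neg (by push_neg; exact ⟨hus, hvg⟩)]
        simp only [hlt, if_false]
      rw [hstep]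
      exact ⟨hS, hR, le_refl _, fun h => Or.inl h,
        fun _ => ⟨rfl, fun _ _ => Int.not_lt.mp hlt⟩⟩

-- everything the B-side needs to know about one path row
def RowOK (N : Int) (G : List (List (Int × Int))) (gt : List Int) (p : List Int) : Prop :=
  (-(N+1) ≤ p.getD 0 0 ∧ p.getD 0 0 ≤ N) ∧ (-(N+1) ≤ p.getD 1 0 ∧ p.getD 1 0 ≤ N) ∧
  -2147483648 ≤ p.getD 2 0 ∧
  TLit G gt (p.getD 0 0) ∧ TLit G gt (p.getD 1 0) ∧
  (p.getD 1 0, p.getD 2 0) ∈ PySem.List.pyGetD G ((canonN N (p.getD 0 0) : Nat) : Int) [] ∧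
  (p.getD 0 0, p.getD 2 0) ∈ PySem.List.pyGetD G ((canonN N (p.getD 1 0) : Nat) : Int) []

theorem bfRow_good {N : Int} {ep : List Int} {G : List (List (Int × Int))} {sm gt : List Int}
    (hG : GoodG N ep G) {p : List Int} (hrow : RowOK N G gt p)
    (I : List Int) (st : List Int × Bool) (hS : SInv N st.1) (hR : Reach N G sm gt I st.1) :
    SInv N (bfRow gt sm st p).1 ∧ Reach N G sm gt I (bfRow gt sm st p).1 ∧
    Phi (bfRow gt sm st p).1 ≤ Phi st.1 ∧
    ((bfRow gt sm st p).2 = true → st.2 = true ∨ Phi (bfRow gt sm st p).1 < Phi st.1) ∧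
    ((bfRow gt sm st p).2 = false → bfRow gt sm st p = st ∧
      (p.getD 0 0 ∉ sm → p.getD 1 0 ∉ gt →
        PySem.List.pyGetD st.1 (p.getD 1 0) 0 ≤ max (PySem.List.pyGetD st.1 (p.getD 0 0) 0) (p.getD 2 0)) ∧
      (p.getD 1 0 ∉ sm → p.getD 0 0 ∉ gt →
        PySem.List.pyGetD st.1 (p.getD 0 0) 0 ≤ max (PySem.List.pyGetD st.1 (p.getD 1 0) 0) (p.getD 2 0))) := by
  obtain ⟨ha, hb, hcb, hTa, hTb, hab, hba⟩ := hrow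
  have hrw : bfRow gt sm st p =
      bfDir gt sm (bfDir gt sm st (p.getD 0 0) (p.getD 1 0) (p.getD 2 0))
        (p.getD 1 0) (p.getD 0 0) (p.getD 2 0) := by
    rw [bfRow]
    simp only [PySem.List.pyGetD_ofNat']
  rw [hrw]
  obtain ⟨b1, b2, b3, b4, b5⟩ :=
    bfDir_good hG ha.1 ha.2 hb.1 hb.2 hcb hTa hab I st hS hR
  obtain ⟨c1, c2, c3, c4, c5⟩ :=
    bfDir_good hG hb.1 hb.2 ha.1 ha.2 hcb hTb hba I
      (bfDir gt sm st (p.getD 0 0) (p.getD 1 0) (p.getD 2 0)) b1 b2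
  refine ⟨c1, c2, le_trans c3 b3, ?_, ?_⟩
  · intro ht
    rcases c4 ht with hf | hp'
    · rcases b4 hf with hf' | hp''
      · exact Or.inl hf'
      · exact Or.inr (lt_of_le_of_lt c3 hp'')
    · exact Or.inr (lt_of_lt_of_le hp' b3)
  · intro hf
    obtain ⟨r1, r2⟩ := c5 hf
    have hf1 : (bfDir gt sm st (p.getD 0 0) (p.getD 1 0) (p.getD 2 0)).2 = false := by
      by_cases h : (bfDir gt sm st (p.getD 0 0) (p.getD 1 0) (p.getD 2 0)).2 = true
      · rw [r1] at hf
        rw [hf] at h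
        cases h
      · simpa using h
    obtain ⟨q1, q2⟩ := b5 hf1
    rw [q1] at r2
    exact ⟨r1.trans q1, q2, r2⟩

theorem bfPass_fold_good {N : Int} {ep : List Int} {G : List (List (Int × Int))} {sm gt : List Int}
    (hG : GoodG N ep G) (I : List Int) :
    ∀ (ps : List (List Int)) (st : List Int × Bool),
      (∀ p ∈ ps, RowOK N G gt p) → SInv N st.1 → Reach N G sm gt I st.1 →
      SInv N (ps.foldl (bfRow gt sm) st).1 ∧
      Reach N G sm gt I (ps.foldl (bfRow gt sm) st).1 ∧
      Phi (ps.foldl (bfRow gt sm) st).1 ≤ Phi st.1 ∧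
      ((ps.foldl (bfRow gt sm) st).2 = true → st.2 = true ∨ Phi (ps.foldl (bfRow gt sm) st).1 < Phi st.1) ∧
      ((ps.foldl (bfRow gt sm) st).2 = false →
        ps.foldl (bfRow gt sm) st = st ∧
        ∀ p ∈ ps,
          (p.getD 0 0 ∉ sm → p.getD 1 0 ∉ gt →
            PySem.List.pyGetD st.1 (p.getD 1 0) 0 ≤ max (PySem.List.pyGetD st.1 (p.getD 0 0) 0) (p.getD 2 0)) ∧
          (p.getD 1 0 ∉ sm → p.getD 0 0 ∉ gt →
            PySem.List.pyGetD st.1 (p.getD 0 0) 0 ≤ max (PySem.List.pyGetD st.1 (p.getD 1 0) 0) (p.getD 2 0))) := by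
  intro ps
  induction ps with
  | nil =>
    intro st _ hS hR
    exact ⟨hS, hR, le_refl _, fun h => Or.inl h, fun _ => ⟨rfl, by simp⟩⟩
  | cons p ps ih =>
    intro st hps hS hR
    simp only [List.foldl_cons]
    obtain ⟨b1, b2, b3, b4, b5⟩ := bfRow_good hG (hps p List.mem_cons_self) I st hS hR
    obtain ⟨c1, c2, c3, c4, c5⟩ :=
      ih (bfRow gt sm st p) (fun q hq => hps q (List.mem_cons_of_mem _ hq)) b1 b2
    refine ⟨c1, c2, le_trans c3 b3, ?_, ?_⟩
    · intro ht
      rcases c4 ht with hf | hp'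
      · rcases b4 hf with hf' | hp''
        · exact Or.inl hf'
        · exact Or.inr (lt_of_le_of_lt c3 hp'')
      · exact Or.inr (lt_of_lt_of_le hp' b3)
    · intro hf
      obtain ⟨r1, r2⟩ := c5 hf
      have hf1 : (bfRow gt sm st p).2 = false := by
        by_cases h : (bfRow gt sm st p).2 = true
        · rw [r1] at hf
          rw [hf] at h
          cases h
        · simpa using h
      obtain ⟨q1, q2, q3⟩ := b5 hf1
      rw [q1] at r2
      refine ⟨r1.trans q1, fun q hq => ?_⟩
      rcases List.mem_cons.mp hq with rfl | hq
      · exact ⟨q2, q3⟩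
      · exact r2 q hq

-- the directed slot edges contributed by the path rows
def RowEdge (N : Int) (paths : List (List Int)) (k : Nat) (v c : Int) : Prop :=
  ∃ p ∈ paths, (canonN N (p.getD 0 0) = k ∧ v = p.getD 1 0 ∧ c = p.getD 2 0) ∨
               (canonN N (p.getD 1 0) = k ∧ v = p.getD 0 0 ∧ c = p.getD 2 0)

theorem bfLoop_good {N : Int} {ep : List Int} {G : List (List (Int × Int))} {sm gt : List Int}
    {paths : List (List Int)}
    (hG : GoodG N ep G) (hC : HCons N G sm gt)
    (hrows : ∀ p ∈ paths, RowOK N G gt p)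
    (hGP : ∀ (k : Nat) (v c : Int), k < (N + 1).toNat →
      ((v, c) ∈ PySem.List.pyGetD G (k : Int) [] → RowEdge N paths k v c))
    (I : List Int) :
    ∀ (fuel : Nat) (I' : List Int), SInv N I' → Reach N G sm gt I I' → Phi I' < fuel →
      StableI N G sm gt (bfLoop paths gt sm fuel I') ∧
      Reach N G sm gt I (bfLoop paths gt sm fuel I') := by
  intro fuel
  induction fuel with
  | zero => intro I' _ _ h; omega
  | succ fuel ih =>
    intro I' hS hR hfuel
    obtain ⟨c1, c2, c3, c4, c5⟩ := bfPass_fold_good hG I paths (I', false) hrows hS hR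
    rw [bfLoop]
    simp only [bfPass]
    by_cases hf : (paths.foldl (bfRow gt sm) (I', false)).2 = true
    · rw [if_pos hf]
      rcases c4 hf with h | h
      · simp at h
      · have h' : Phi (paths.foldl (bfRow gt sm) (I', false)).1 < Phi I' := h
        exact ih _ c1 c2 (by omega)
    · rw [if_neg hf]
      obtain ⟨r1, r2⟩ := c5 (by simpa using hf)
      rw [r1]
      refine ⟨?_, hR⟩
      intro k v c hk hEX hedge hvg
      obtain ⟨p, hpm, hcase⟩ := hGP k v c hk hedge
      obtain ⟨ha, hb, hcb, hTa, hTb, _, _⟩ := hrows p hpm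
      obtain ⟨z, hzT, hzk, hzs⟩ := hEX
      rcases hcase with ⟨hk1, hv', hc'⟩ | ⟨hk1, hv', hc'⟩
      · subst hv'; subst hc'
        have hsrc_ns : p.getD 0 0 ∉ sm := fun hin =>
          hzs (hC (p.getD 0 0) z hTa hzT (by rw [hk1, hzk]) hin)
        have hobl := (r2 p hpm).1 hsrc_ns hvg
        rw [pyGetD_slot I' N (p.getD 0 0) 0 hS.1 ha.1 ha.2, hk1,
          pyGetD_slot I' N (p.getD 1 0) 0 hS.1 hb.1 hb.2] at hobl
        exact hobl
      · subst hv'; subst hc'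
        have hsrc_ns : p.getD 1 0 ∉ sm := fun hin =>
          hzs (hC (p.getD 1 0) z hTb hzT (by rw [hk1, hzk]) hin)
        have hobl := (r2 p hpm).2 hsrc_ns hvg
        rw [pyGetD_slot I' N (p.getD 1 0) 0 hS.1 hb.1 hb.2, hk1,
          pyGetD_slot I' N (p.getD 0 0) 0 hS.1 ha.1 ha.2] at hobl
        exact hobl

-- ===== builder: entry discipline and row characterisation =====

def gstep (g : List (List (Int × Int))) (p : List Int) : List (List (Int × Int)) :=
  PySem.List.pySetD
    (PySem.List.pySetD g (PySem.List.pyGetD p 0 0)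
      (PySem.List.pyGetD g (PySem.List.pyGetD p 0 0) [] ++
        [(PySem.List.pyGetD p 1 0, PySem.List.pyGetD p 2 0)]))
    (PySem.List.pyGetD p 1 0)
    (PySem.List.pyGetD
      (PySem.List.pySetD g (PySem.List.pyGetD p 0 0)
        (PySem.List.pyGetD g (PySem.List.pyGetD p 0 0) [] ++
          [(PySem.List.pyGetD p 1 0, PySem.List.pyGetD p 2 0)]))
      (PySem.List.pyGetD p 1 0) [] ++
      [(PySem.List.pyGetD p 0 0, PySem.List.pyGetD p 2 0)])

theorem buildGraphA_eq (n : Int) (paths : List (List Int)) :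
    buildGraphA n paths = paths.foldl gstep (List.replicate (n + 1).toNat []) := rfl


theorem getDl_set {α : Type} (d : α) (I : List α) (i k : Nat) (w : α) :
    (I.set i w).getD k d = if i = k ∧ i < I.length then w else I.getD k d := by
  rcases Nat.lt_or_ge k I.length with hk | hk
  · by_cases h : i = k
    · subst h
      by_cases hi : i < I.length
      · simp [List.getD_eq_getElem?_getD, List.getElem?_set, hi]
      · omega
    · simp [List.getD_eq_getElem?_getD, List.getElem?_set, h]
  · have h1 : I.getD k d = d := List.getD_eq_default _ _ hk
    have h2 : (I.set i w).getD k d = d := List.getD_eq_default _ _ (by simpa using hk)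
    rw [h1, h2]
    by_cases h : i = k ∧ i < I.length
    · rcases h with ⟨rfl, h⟩; omega
    · simp [h]

theorem mem_getD_set_append {α : Type} (g : List (List α)) (i k : Nat) (x : α)
    (hi : i < g.length) (y : α) :
    y ∈ (g.set i (g.getD i [] ++ [x])).getD k [] ↔ y ∈ g.getD k [] ∨ (i = k ∧ y = x) := by
  rw [getDl_set]
  by_cases e : i = k
  · subst e
    rw [if_pos ⟨rfl, hi⟩]
    simp [List.mem_append]
  · rw [if_neg (fun h => e h.1)]
    simp [e]

theorem goodG_update {N : Int} {ep : List Int} {g : List (List (Int × Int))}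
    (hG : GoodG N ep g) {a v c : Int}
    (ha1 : -(N+1) ≤ a) (ha2 : a ≤ N)
    (hv : -(N+1) ≤ v ∧ v ≤ N ∧ -2147483648 ≤ c ∧ v ∈ ep) :
    GoodG N ep (PySem.List.pySetD g a (PySem.List.pyGetD g a [] ++ [(v, c)])) := by
  rw [pySetD_slot g N a _ hG.1 ha1 ha2]
  refine ⟨by simpa using hG.1, ?_⟩
  intro b hb e he
  rcases List.mem_or_eq_of_mem_set hb with h | rfl
  · exact hG.2 b h e he
  · rcases List.mem_append.mp he with h | h
    · exact goodG_bucket hG a h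
    · simp only [List.mem_singleton] at h
      subst h; exact hv

theorem getD_mem_of_length {p : List Int} {k : Nat} (hk : k < p.length) : p.getD k 0 ∈ p := by
  rw [List.getD_eq_getElem _ _ hk]; exact List.getElem_mem hk

theorem goodG_fold (n : Int) (ep : List Int) :
    ∀ (ps : List (List Int)) (g0 : List (List (Int × Int))),
      (∀ p ∈ ps, (-(n+1) ≤ p.getD 0 0 ∧ p.getD 0 0 ≤ n) ∧ (-(n+1) ≤ p.getD 1 0 ∧ p.getD 1 0 ≤ n) ∧
        -2147483648 ≤ p.getD 2 0 ∧ p.getD 0 0 ∈ ep ∧ p.getD 1 0 ∈ ep) →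
      GoodG n ep g0 →
      GoodG n ep (ps.foldl gstep g0)
  | [], g0, _, h0 => h0
  | p :: ps, g0, hps, h0 => by
    simp only [List.foldl_cons]
    obtain ⟨hL0, hL1, hc, hm0, hm1⟩ := hps p List.mem_cons_self
    have e0 : PySem.List.pyGetD p 0 (0:Int) = p.getD 0 0 := PySem.List.pyGetD_ofNat' p 0 0
    have e1 : PySem.List.pyGetD p 1 (0:Int) = p.getD 1 0 := PySem.List.pyGetD_ofNat' p 1 0
    have e2 : PySem.List.pyGetD p 2 (0:Int) = p.getD 2 0 := PySem.List.pyGetD_ofNat' p 2 0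
    refine goodG_fold n ep ps _ (fun q hq => hps q (List.mem_cons_of_mem _ hq)) ?_
    rw [gstep]
    simp only [e0, e1, e2]
    have hstep1 := goodG_update h0 hL0.1 hL0.2 ⟨hL1.1, hL1.2, hc, hm1⟩
    exact goodG_update hstep1 hL1.1 hL1.2 ⟨hL0.1, hL0.2, hc, hm0⟩

theorem buildGraphA_good (n : Int) (paths : List (List Int))
    (hdom : ∀ p ∈ paths, ∀ x ∈ p, -2147483648 ≤ x ∧ x ≤ 2147483648)
    (hpre : ∀ p ∈ paths, p.length = 3 ∧ (-(n+1) ≤ p.getD 0 0 ∧ p.getD 0 0 ≤ n) ∧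
      (-(n+1) ≤ p.getD 1 0 ∧ p.getD 1 0 ≤ n)) :
    GoodG n (paths.flatMap (fun p => [p.getD 0 0, p.getD 1 0])) (buildGraphA n paths) := by
  rw [buildGraphA_eq]
  refine goodG_fold n _ paths _ (fun p hp => ?_) ⟨by simp, ?_⟩
  · obtain ⟨hp3, hL0, hL1⟩ := hpre p hp
    have hc : -2147483648 ≤ p.getD 2 0 := (hdom p hp _ (getD_mem_of_length (by omega))).1
    exact ⟨hL0, hL1, hc, List.mem_flatMap.mpr ⟨p, hp, by simp⟩,
      List.mem_flatMap.mpr ⟨p, hp, by simp⟩⟩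
  · intro b hb e he
    rw [List.eq_of_mem_replicate hb] at he
    simp at he

theorem rowEdge_cons (N : Int) (p : List Int) (ps : List (List Int)) (k : Nat) (v c : Int) :
    RowEdge N (p :: ps) k v c ↔
      ((canonN N (p.getD 0 0) = k ∧ v = p.getD 1 0 ∧ c = p.getD 2 0) ∨
       (canonN N (p.getD 1 0) = k ∧ v = p.getD 0 0 ∧ c = p.getD 2 0)) ∨
      RowEdge N ps k v c := by
  constructor
  · rintro ⟨q, hq, hd⟩
    rcases List.mem_cons.mp hq with rfl | hq
    · exact Or.inl hd
    · exact Or.inr ⟨q, hq, hd⟩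
  · rintro (hd | ⟨q, hq, hd⟩)
    · exact ⟨p, List.mem_cons_self, hd⟩
    · exact ⟨q, List.mem_cons_of_mem _ hq, hd⟩

theorem char_fold (N : Int) :
    ∀ (ps : List (List Int)) (g : List (List (Int × Int))),
      (∀ p ∈ ps, (-(N+1) ≤ p.getD 0 0 ∧ p.getD 0 0 ≤ N) ∧ (-(N+1) ≤ p.getD 1 0 ∧ p.getD 1 0 ≤ N)) →
      g.length = (N + 1).toNat →
      (ps.foldl gstep g).length = (N + 1).toNat ∧
      ∀ (k : Nat) (v c : Int), k < (N + 1).toNat →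
        ((v, c) ∈ (ps.foldl gstep g).getD k [] ↔
          (v, c) ∈ g.getD k [] ∨ RowEdge N ps k v c)
  | [], g, _, hlen => ⟨hlen, by
      intro k v c _
      simp [RowEdge]⟩
  | p :: ps, g, hps, hlen => by
    simp only [List.foldl_cons]
    rw [gstep]
    obtain ⟨hL0, hL1⟩ := hps p List.mem_cons_self
    have e0 : PySem.List.pyGetD p 0 (0:Int) = p.getD 0 0 := PySem.List.pyGetD_ofNat' p 0 0
    have e1 : PySem.List.pyGetD p 1 (0:Int) = p.getD 1 0 := PySem.List.pyGetD_ofNat' p 1 0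
    have e2 : PySem.List.pyGetD p 2 (0:Int) = p.getD 2 0 := PySem.List.pyGetD_ofNat' p 2 0
    have hka : canonN N (p.getD 0 0) < g.length := by
      rw [hlen]; exact canonN_lt N _ hL0.1 hL0.2
    have hg1eq : PySem.List.pySetD g (PySem.List.pyGetD p 0 0)
        (PySem.List.pyGetD g (PySem.List.pyGetD p 0 0) [] ++ [(PySem.List.pyGetD p 1 0, PySem.List.pyGetD p 2 0)])
        = g.set (canonN N (p.getD 0 0))
            (g.getD (canonN N (p.getD 0 0)) [] ++ [(p.getD 1 0, p.getD 2 0)]) := by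
      rw [e0, e1, e2, pySetD_slot g N _ _ hlen hL0.1 hL0.2, pyGetD_slot g N _ _ hlen hL0.1 hL0.2]
    have hg1len : (g.set (canonN N (p.getD 0 0))
        (g.getD (canonN N (p.getD 0 0)) [] ++ [(p.getD 1 0, p.getD 2 0)])).length
        = (N + 1).toNat := by simpa using hlen
    have hkb : canonN N (p.getD 1 0) <
        (g.set (canonN N (p.getD 0 0))
          (g.getD (canonN N (p.getD 0 0)) [] ++ [(p.getD 1 0, p.getD 2 0)])).length := by
      rw [hg1len]; exact canonN_lt N _ hL1.1 hL1.2
    have hg2eq : PySem.List.pySetD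
        (g.set (canonN N (p.getD 0 0)) (g.getD (canonN N (p.getD 0 0)) [] ++ [(p.getD 1 0, p.getD 2 0)]))
        (PySem.List.pyGetD p 1 0)
        (PySem.List.pyGetD
          (g.set (canonN N (p.getD 0 0)) (g.getD (canonN N (p.getD 0 0)) [] ++ [(p.getD 1 0, p.getD 2 0)]))
          (PySem.List.pyGetD p 1 0) [] ++ [(PySem.List.pyGetD p 0 0, PySem.List.pyGetD p 2 0)])
        = (g.set (canonN N (p.getD 0 0)) (g.getD (canonN N (p.getD 0 0)) [] ++ [(p.getD 1 0, p.getD 2 0)])).set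
            (canonN N (p.getD 1 0))
            ((g.set (canonN N (p.getD 0 0)) (g.getD (canonN N (p.getD 0 0)) [] ++ [(p.getD 1 0, p.getD 2 0)])).getD
              (canonN N (p.getD 1 0)) [] ++ [(p.getD 0 0, p.getD 2 0)]) := by
      rw [e0, e1, e2, pySetD_slot _ N _ _ hg1len hL1.1 hL1.2, pyGetD_slot _ N _ _ hg1len hL1.1 hL1.2]
    rw [hg1eq, hg2eq]
    obtain ⟨ih1, ih2⟩ := char_fold N ps
      ((g.set (canonN N (p.getD 0 0)) (g.getD (canonN N (p.getD 0 0)) [] ++ [(p.getD 1 0, p.getD 2 0)])).set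
        (canonN N (p.getD 1 0))
        ((g.set (canonN N (p.getD 0 0)) (g.getD (canonN N (p.getD 0 0)) [] ++ [(p.getD 1 0, p.getD 2 0)])).getD
          (canonN N (p.getD 1 0)) [] ++ [(p.getD 0 0, p.getD 2 0)]))
      (fun q hq => hps q (List.mem_cons_of_mem _ hq))
      (by simp only [List.length_set]; exact hlen)
    refine ⟨ih1, ?_⟩
    intro k v c hk
    rw [ih2 k v c hk, mem_getD_set_append _ _ _ _ hkb, mem_getD_set_append _ _ _ _ hka,
      rowEdge_cons]
    simp only [Prod.mk.injEq]
    tauto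

theorem buildGraphA_char (N : Int) (paths : List (List Int))
    (hpre : ∀ p ∈ paths, (-(N+1) ≤ p.getD 0 0 ∧ p.getD 0 0 ≤ N) ∧
      (-(N+1) ≤ p.getD 1 0 ∧ p.getD 1 0 ≤ N)) :
    ∀ (k : Nat) (v c : Int), k < (N + 1).toNat →
      ((v, c) ∈ (buildGraphA N paths).getD k [] ↔ RowEdge N paths k v c) := by
  intro k v c hk
  rw [buildGraphA_eq]
  obtain ⟨_, h2⟩ := char_fold N paths (List.replicate (N + 1).toNat []) hpre (by simp)
  rw [h2 k v c hk]
  have hrep : (List.replicate (N + 1).toNat ([] : List (Int × Int))).getD k [] = [] := by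
    rw [List.getD_eq_getElem _ _ (by simpa using hk), List.getElem_replicate]
  rw [hrep]
  simp

-- invariant of the gate-initialisation fold (A's pair version)
def InitInv (N : Int) (G : List (List (Int × Int))) (gt : List Int)
    (st : List Int × List (Int × Int)) (k : Nat) : Prop :=
  st.2.length = k ∧ SInv N st.1 ∧
  (∀ p ∈ st.2, p.1 = 0 ∧ ((-(N+1) ≤ p.2 ∧ p.2 ≤ N) ∧ TLit G gt p.2) ∧
    st.1.getD (canonN N p.2) 0 = 0) ∧
  ∀ j : Nat, j < (N + 1).toNat →
    st.1.getD j 0 = 1000000000 ∨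
    (st.1.getD j 0 = 0 ∧ ∃ g, ((-(N+1) ≤ g ∧ g ≤ N) ∧ TLit G gt g) ∧ canonN N g = j ∧
      (0, g) ∈ st.2)

theorem initA_fold (N : Int) (G : List (List (Int × Int))) (gt : List Int) :
    ∀ (gs : List Int) (st : List Int × List (Int × Int)) (k : Nat),
      (∀ g ∈ gs, (-(N+1) ≤ g ∧ g ≤ N) ∧ g ∈ gt) → InitInv N G gt st k →
      InitInv N G gt (gs.foldl
        (fun (st : List Int × List (Int × Int)) g => (PySem.List.pySetD st.1 g 0, st.2 ++ [(0, g)]))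
        st) (k + gs.length)
  | [], st, k, _, h => by simpa using h
  | g :: gs, st, k, hgs, h => by
    simp only [List.foldl_cons]
    obtain ⟨⟨hg1, hg2⟩, hg3⟩ := hgs g List.mem_cons_self
    have hgT : TLit G gt g := Or.inl hg3
    obtain ⟨h1, ⟨h2a, h2b⟩, h3, h4⟩ := h
    have hgL : canonN N g < st.1.length := by rw [h2a]; exact canonN_lt N g hg1 hg2
    have hsetr : PySem.List.pySetD st.1 g 0 = st.1.set (canonN N g) 0 :=
      pySetD_slot st.1 N g 0 h2a hg1 hg2
    have hstep : InitInv N G gt (PySem.List.pySetD st.1 g 0, st.2 ++ [(0, g)]) (k + 1) := by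
      rw [hsetr]
      refine ⟨by simp [h1], ⟨by simpa using h2a, ?_⟩, ?_, ?_⟩
      · intro j hj
        rw [getD_set]
        split_ifs with hh
        · omega
        · exact h2b j (by simpa using hj)
      · intro p hp
        rcases List.mem_append.mp hp with hp | hp
        · obtain ⟨q1, q2, q3⟩ := h3 p hp
          refine ⟨q1, q2, ?_⟩
          rw [getD_set]
          split_ifs with hh
          · rfl
          · exact q3
        · simp only [List.mem_singleton] at hp
          subst hp
          refine ⟨rfl, ⟨⟨hg1, hg2⟩, hgT⟩, ?_⟩
          rw [getD_set, if_pos ⟨rfl, hgL⟩]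
      · intro j hj
        rw [getD_set]
        by_cases he : canonN N g = j
        · rw [if_pos ⟨he, hgL⟩]
          exact Or.inr ⟨rfl, g, ⟨⟨hg1, hg2⟩, hgT⟩, he, by simp⟩
        · rw [if_neg (fun hh => he hh.1)]
          rcases h4 j hj with hc | ⟨hc1, x, hx, hxj, hxm⟩
          · exact Or.inl hc
          · exact Or.inr ⟨hc1, x, hx, hxj, List.mem_append_left _ hxm⟩
    have := initA_fold N G gt gs _ (k + 1) (fun x hx => hgs x (List.mem_cons_of_mem _ hx)) hstep
    simpa [Nat.add_assoc, Nat.add_comm 1 gs.length] using this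

theorem initA_good (N : Int) (G : List (List (Int × Int))) (gt : List Int) (gates : List Int)
    (hg : ∀ g ∈ gates, (-(N+1) ≤ g ∧ g ≤ N) ∧ g ∈ gt) :
    InitInv N G gt (gates.foldl
      (fun (st : List Int × List (Int × Int)) g => (PySem.List.pySetD st.1 g 0, st.2 ++ [(0, g)]))
      (List.replicate (N + 1).toNat 1000000000, [])) gates.length := by
  have hbase : InitInv N G gt
      ((List.replicate (N + 1).toNat (1000000000 : Int)), ([] : List (Int × Int))) 0 := by
    refine ⟨rfl, ⟨by simp, ?_⟩, by simp, ?_⟩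
    · intro j hj
      rw [List.getD_eq_getElem _ _ hj, List.getElem_replicate]
      omega
    · intro j hj
      left
      rw [List.getD_eq_getElem _ _ (by simpa using hj), List.getElem_replicate]
  simpa using initA_fold N G gt gates _ 0 hg hbase

theorem foldl_fst {α β γ : Type} (f : α → γ → α) (h : α × β → γ → β) (l : List γ) (a : α) (b : β) :
    (l.foldl (fun st g => (f st.1 g, h st g)) (a, b)).1 = l.foldl f a := by
  induction l generalizing a b with
  | nil => rfl
  | cons x xs ih => simpa using ih (f a x) (h (a, b) x)

-- ===== answer extraction (sorted strict scan = lexicographic min fold) =====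

theorem pairLt_self (x : Int × Int) : pairLt x x = false := by simp [pairLt]

theorem pairLt_antisymm {x y : Int × Int} (h1 : pairLt x y = false) (h2 : pairLt y x = false) :
    x = y := by
  simp [pairLt] at h1 h2
  exact Prod.ext (by omega) (by omega)

theorem pairLt_false_trans {x y z : Int × Int} (h1 : pairLt y x = false) (h2 : pairLt z y = false) :
    pairLt z x = false := by
  simp [pairLt] at *; omega

theorem pairLt_asymm {x y : Int × Int} (h : pairLt x y = true) : pairLt y x = false := by
  simp [pairLt] at *; omega

theorem pyGetD_int_getD (p : List Int) (k : Nat) :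
    PySem.List.pyGetD p (OfNat.ofNat k) (0:Int) = p.getD k 0 := PySem.List.pyGetD_ofNat' p k 0

def gA (I : List Int) (p : Int × Int) (s : Int) : Int × Int :=
  if PySem.List.pyGetD I s 0 < p.1 then (PySem.List.pyGetD I s 0, s) else p

def gB (I : List Int) (p : Int × Int) (s : Int) : Int × Int :=
  if pairLt (PySem.List.pyGetD I s 0, s) p then (PySem.List.pyGetD I s 0, s) else p

theorem foldl_ans_pair (I : List Int) (ss : List Int) (p : Int × Int) :
    ss.foldl (fun ans s =>
      if PySem.List.pyGetD I s 0 < PySem.List.pyGetD ans 1 0 then [s, PySem.List.pyGetD I s 0]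
      else ans) [p.2, p.1] =
    (fun q : Int × Int => [q.2, q.1]) (ss.foldl (gA I) p) := by
  induction ss generalizing p with
  | nil => rfl
  | cons s t ih =>
    simp only [List.foldl_cons]
    have hg : PySem.List.pyGetD [p.2, p.1] 1 0 = p.1 := by
      rw [pyGetD_int_getD]; rfl
    rw [hg]
    by_cases h : PySem.List.pyGetD I s 0 < p.1
    · rw [if_pos h]
      simpa [gA, h] using ih (PySem.List.pyGetD I s 0, s)
    · rw [if_neg h]
      simpa [gA, h] using ih p

theorem fb_min (I : List Int) :
    ∀ (ss : List Int) (p : Int × Int),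
      (ss.foldl (gB I) p = p ∨ ∃ s ∈ ss, ss.foldl (gB I) p = (PySem.List.pyGetD I s 0, s)) ∧
      pairLt p (ss.foldl (gB I) p) = false ∧
      ∀ s ∈ ss, pairLt (PySem.List.pyGetD I s 0, s) (ss.foldl (gB I) p) = false
  | [], p => ⟨Or.inl rfl, pairLt_self p, by simp⟩
  | s :: t, p => by
    simp only [List.foldl_cons]
    obtain ⟨ihm, ihp, ihs⟩ := fb_min I t (gB I p s)
    have hp' : pairLt p (gB I p s) = false := by
      rw [gB]; split
      · rename_i hupd; exact pairLt_asymm hupd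
      · exact pairLt_self p
    have hrp : pairLt p (t.foldl (gB I) (gB I p s)) = false := pairLt_false_trans ihp hp'
    refine ⟨?_, hrp, ?_⟩
    · rcases ihm with he | ⟨u, hu, he⟩
      · rw [he, gB]; split
        · exact Or.inr ⟨s, List.mem_cons_self, rfl⟩
        · exact Or.inl rfl
      · exact Or.inr ⟨u, List.mem_cons_of_mem _ hu, he⟩
    · intro u hu
      rcases List.mem_cons.mp hu with he | hu'
      · subst he
        by_cases hupd : pairLt (PySem.List.pyGetD I u 0, u) p = true
        · have : gB I p u = (PySem.List.pyGetD I u 0, u) := by rw [gB, if_pos hupd]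
          rw [← this]; exact ihp
        · simp only [Bool.not_eq_true] at hupd
          exact pairLt_false_trans hrp hupd
      · exact ihs u hu'

theorem fa_mem (I : List Int) :
    ∀ (ss : List Int) (p : Int × Int),
      ss.foldl (gA I) p = p ∨
      ((ss.foldl (gA I) p).1 < p.1 ∧ ∃ s ∈ ss, ss.foldl (gA I) p = (PySem.List.pyGetD I s 0, s))
  | [], p => Or.inl rfl
  | s :: t, p => by
    simp only [List.foldl_cons]
    by_cases h : PySem.List.pyGetD I s 0 < p.1
    · rw [show gA I p s = (PySem.List.pyGetD I s 0, s) from by rw [gA, if_pos h]]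
      rcases fa_mem I t (PySem.List.pyGetD I s 0, s) with he | ⟨hlt, u, hu, he⟩
      · rw [he]; exact Or.inr ⟨by simpa using h, s, List.mem_cons_self, rfl⟩
      · refine Or.inr ⟨?_, u, List.mem_cons_of_mem _ hu, he⟩
        simp only at hlt; omega
    · rw [show gA I p s = p from by rw [gA, if_neg h]]
      rcases fa_mem I t p with he | ⟨hlt, u, hu, he⟩
      · exact Or.inl he
      · exact Or.inr ⟨hlt, u, List.mem_cons_of_mem _ hu, he⟩

theorem fa_le_aux {r p' : Int × Int} (h : r = p' ∨ r.1 < p'.1) :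
    pairLt p' r = false := by
  rcases h with he | hlt
  · rw [he]; exact pairLt_self p'
  · simp [pairLt]; omega

theorem fa_le (I : List Int) :
    ∀ (ss : List Int), ss.Pairwise (· ≤ ·) →
      ∀ (p : Int × Int) (s : Int), s ∈ ss →
        pairLt (PySem.List.pyGetD I s 0, s) (ss.foldl (gA I) p) = false ∨ p.1 ≤ PySem.List.pyGetD I s 0
  | [], _, p, s, hs => absurd hs (List.not_mem_nil)
  | a :: t, hsor, p, s, hs => by
    obtain ⟨hle, htsor⟩ := List.pairwise_cons.mp hsor
    simp only [List.foldl_cons]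
    by_cases h : PySem.List.pyGetD I a 0 < p.1
    · rw [show gA I p a = (PySem.List.pyGetD I a 0, a) from by rw [gA, if_pos h]]
      have hrle : pairLt (PySem.List.pyGetD I a 0, a)
          (t.foldl (gA I) (PySem.List.pyGetD I a 0, a)) = false :=
        fa_le_aux (by
          rcases fa_mem I t (PySem.List.pyGetD I a 0, a) with he | ⟨hlt, _⟩
          exacts [Or.inl he, Or.inr hlt])
      rcases List.mem_cons.mp hs with he | hs'
      · subst he; exact Or.inl hrle
      · rcases fa_le I t htsor (PySem.List.pyGetD I a 0, a) s hs' with hl | hr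
        · exact Or.inl hl
        · simp only at hr
          have has : a ≤ s := hle s hs'
          left
          refine pairLt_false_trans hrle ?_
          simp [pairLt]; omega
    · rw [show gA I p a = p from by rw [gA, if_neg h]]
      rcases List.mem_cons.mp hs with he | hs'
      · subst he; right; omega
      · exact fa_le I t htsor p s hs'

theorem fa_plateau (I : List Int) :
    ∀ (ss : List Int) (p : Int × Int), (∀ s ∈ ss, p.1 ≤ PySem.List.pyGetD I s 0) →
      ss.foldl (gA I) p = p
  | [], p, _ => rfl
  | s :: t, p, h => by
    simp only [List.foldl_cons]
    have hps : gA I p s = p := by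
      rw [gA, if_neg (by have := h s List.mem_cons_self; omega)]
    rw [hps]
    exact fa_plateau I t p (fun u hu => h u (List.mem_cons_of_mem _ hu))

theorem fb_plateau (I : List Int) :
    ∀ (ss : List Int) (p : Int × Int), 1000000000 ≤ p.1 →
      (∀ s ∈ ss, (1000000000:Int) ≤ PySem.List.pyGetD I s 0) →
      (1000000000:Int) ≤ (ss.foldl (gB I) p).1
  | [], p, hp, _ => hp
  | s :: t, p, hp, h => by
    simp only [List.foldl_cons]
    refine fb_plateau I t (gB I p s) ?_ (fun u hu => h u (List.mem_cons_of_mem _ hu))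
    rw [gB]; split
    · exact h s List.mem_cons_self
    · exact hp

theorem answer_eq (I : List Int) (summits : List Int) :
    (fun q : Int × Int => [q.2, q.1])
      ((PySem.List.sorted summits (fun s => s) false).foldl (gA I) (1000000000, 1000000000)) =
    (let best := summits.foldl (gB I) (1000000000, 1000000000)
     if best.1 < 1000000000 then [best.2, best.1] else [1000000000, 1000000000]) := by
  have hmem : ∀ x : Int, x ∈ PySem.List.sorted summits (fun s => s) false ↔ x ∈ summits :=
    fun x => PySem.List.mem_sorted summits (fun s => s) false x
  have hsor : (PySem.List.sorted summits (fun s => s) false).Pairwise (· ≤ ·) := by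
    simpa using PySem.List.sorted_pairwise (xs := summits) (key := fun s => s)
  simp only []
  by_cases hP : ∃ s ∈ summits, PySem.List.pyGetD I s 0 < 1000000000
  · obtain ⟨s0, hs0m, hs0⟩ := hP
    obtain ⟨hbm, _, hbs⟩ := fb_min I summits (1000000000, 1000000000)
    have hrb_le : pairLt (PySem.List.pyGetD I s0 0, s0) (summits.foldl (gB I) (1000000000, 1000000000)) = false :=
      hbs s0 hs0m
    have hrb1 : (summits.foldl (gB I) (1000000000, 1000000000)).1 < 1000000000 := by
      simp [pairLt] at hrb_le; omega
    rcases hbm with he | ⟨t, htm, hte⟩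
    · rw [he] at hrb1; omega
    have hs0m' : s0 ∈ PySem.List.sorted summits (fun s => s) false := (hmem s0).mpr hs0m
    have hAle0 := fa_le I _ hsor (1000000000, 1000000000) s0 hs0m'
    have hr_le_s0 : pairLt (PySem.List.pyGetD I s0 0, s0)
        ((PySem.List.sorted summits (fun s => s) false).foldl (gA I) (1000000000, 1000000000)) = false := by
      rcases hAle0 with h | h
      · exact h
      · omega
    have hr1 : ((PySem.List.sorted summits (fun s => s) false).foldl (gA I) (1000000000, 1000000000)).1 < 1000000000 := by
      simp [pairLt] at hr_le_s0; omega
    rcases fa_mem I (PySem.List.sorted summits (fun s => s) false) (1000000000, 1000000000) with he | ⟨_, u, hum, hue⟩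
    · rw [he] at hr1; omega
    have htm' : t ∈ PySem.List.sorted summits (fun s => s) false := (hmem t).mpr htm
    have h1 : pairLt (summits.foldl (gB I) (1000000000, 1000000000))
        ((PySem.List.sorted summits (fun s => s) false).foldl (gA I) (1000000000, 1000000000)) = false := by
      rcases fa_le I _ hsor (1000000000, 1000000000) t htm' with h | h
      · rw [← hte] at h; exact h
      · rw [hte] at hrb1; simp only at hrb1; omega
    have h2 : pairLt ((PySem.List.sorted summits (fun s => s) false).foldl (gA I) (1000000000, 1000000000))
        (summits.foldl (gB I) (1000000000, 1000000000)) = false := by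
      have := hbs u ((hmem u).mp hum)
      rw [← hue] at this; exact this
    have heq := pairLt_antisymm h2 h1
    rw [heq, if_pos (by rw [← heq]; exact hr1)]
  · simp only [not_exists, not_and, not_lt] at hP
    have hA : (PySem.List.sorted summits (fun s => s) false).foldl (gA I) (1000000000, 1000000000) = (1000000000, 1000000000) :=
      fa_plateau I _ _ (fun s hs => by simpa using hP s ((hmem s).mp hs))
    have hB : (1000000000:Int) ≤ (summits.foldl (gB I) (1000000000, 1000000000)).1 :=
      fb_plateau I summits _ (by simp) (fun s hs => by simpa using hP s hs)
    rw [hA, if_neg (by omega)]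

-- ===== VERDICT (by name: the statement is the Claim_ definition above) =====
theorem solution_spec : Claim_equal_solution := by
  intro n paths gates summits hdom hpre
  obtain ⟨hp, hg, hs, hcons⟩ := hpre
  have hdom' : ∀ p ∈ paths, ∀ x ∈ p, -2147483648 ≤ x ∧ x ≤ 2147483648 := by
    unfold Dom_solution at hdom
    simp only [Bool.and_eq_true, List.all_eq_true, pvDomInt, decide_eq_true_eq] at hdom
    exact fun p hp x hx => hdom.1.1.2 p hp x hx
  have hG : GoodG n (paths.flatMap (fun p => [p.getD 0 0, p.getD 1 0])) (buildGraphA n paths) :=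
    buildGraphA_good n paths hdom' hp
  have hchar := buildGraphA_char n paths (fun p hp' => ⟨(hp p hp').2.1, (hp p hp').2.2⟩)
  have hGmem : ∀ k : Nat, k < (n + 1).toNat → (buildGraphA n paths).getD k [] ∈ buildGraphA n paths := by
    intro k hk
    have hkL : k < (buildGraphA n paths).length := by rw [hG.1]; exact hk
    rw [List.getD_eq_getElem _ _ hkL]
    exact List.getElem_mem hkL
  have hTfacts : ∀ z, TLit (buildGraphA n paths) (PySem.Set.ofList gates) z →
      (-(n+1) ≤ z ∧ z ≤ n) ∧
      z ∈ gates ++ paths.flatMap (fun p => [p.getD 0 0, p.getD 1 0]) := by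
    rintro z (hzg | ⟨b, hb, e, he, rfl⟩)
    · have hzm := (PySem.Set.mem_ofList gates z).mp hzg
      exact ⟨hg z hzm, List.mem_append_left _ hzm⟩
    · have := hG.2 b hb e he
      exact ⟨⟨this.1, this.2.1⟩, List.mem_append_right _ this.2.2.2⟩
  have hC : HCons n (buildGraphA n paths) (PySem.Set.ofList summits) (PySem.Set.ofList gates) := by
    intro z y hTz hTy hck hzsm
    obtain ⟨⟨hz1, hz2⟩, hzm⟩ := hTfacts z hTz
    obtain ⟨⟨hy1, hy2⟩, hym⟩ := hTfacts y hTy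
    have hiff := hcons z hzm y hym (by
      rw [← canonN_cast n z hz1 hz2, ← canonN_cast n y hy1 hy2]
      exact congrArg _ hck)
    exact (PySem.Set.mem_ofList summits y).mpr
      (hiff.mp ((PySem.Set.mem_ofList summits z).mp hzsm))
  have hrows : ∀ p ∈ paths, RowOK n (buildGraphA n paths) (PySem.Set.ofList gates) p := by
    intro p hp'
    obtain ⟨hp3, ha, hb⟩ := hp p hp'
    have hcost : -2147483648 ≤ p.getD 2 0 :=
      (hdom' p hp' _ (getD_mem_of_length (by omega))).1
    have hedge_ab : (p.getD 1 0, p.getD 2 0) ∈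
        PySem.List.pyGetD (buildGraphA n paths) ((canonN n (p.getD 0 0) : Nat) : Int) [] := by
      rw [PySem.List.pyGetD_natCast]
      exact (hchar _ _ _ (canonN_lt n _ ha.1 ha.2)).mpr ⟨p, hp', Or.inl ⟨rfl, rfl, rfl⟩⟩
    have hedge_ba : (p.getD 0 0, p.getD 2 0) ∈
        PySem.List.pyGetD (buildGraphA n paths) ((canonN n (p.getD 1 0) : Nat) : Int) [] := by
      rw [PySem.List.pyGetD_natCast]
      exact (hchar _ _ _ (canonN_lt n _ hb.1 hb.2)).mpr ⟨p, hp', Or.inr ⟨rfl, rfl, rfl⟩⟩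
    refine ⟨ha, hb, hcost, ?_, ?_, hedge_ab, hedge_ba⟩
    · refine Or.inr ⟨_, hGmem _ (canonN_lt n _ hb.1 hb.2), (p.getD 0 0, p.getD 2 0), ?_, rfl⟩
      exact (hchar _ _ _ (canonN_lt n _ hb.1 hb.2)).mpr ⟨p, hp', Or.inr ⟨rfl, rfl, rfl⟩⟩
    · refine Or.inr ⟨_, hGmem _ (canonN_lt n _ ha.1 ha.2), (p.getD 1 0, p.getD 2 0), ?_, rfl⟩
      exact (hchar _ _ _ (canonN_lt n _ ha.1 ha.2)).mpr ⟨p, hp', Or.inl ⟨rfl, rfl, rfl⟩⟩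
  have hGP : ∀ (k : Nat) (v c : Int), k < (n + 1).toNat →
      ((v, c) ∈ PySem.List.pyGetD (buildGraphA n paths) (k : Int) [] → RowEdge n paths k v c) := by
    intro k v c hk hm
    rw [PySem.List.pyGetD_natCast] at hm
    exact (hchar k v c hk).mp hm
  unfold Spec_solution solution solution_alt
  dsimp only
  rw [show (gates.foldl (fun (I : List Int) g => PySem.List.pySetD I g 0)
        (List.replicate (n + 1).toNat (1000000000 : Int)))
      = (gates.foldl
          (fun (st : List Int × List (Int × Int)) g =>
            (PySem.List.pySetD st.1 g 0, st.2 ++ [(0, g)]))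
          (List.replicate (n + 1).toNat 1000000000, ([] : List (Int × Int)))).1
    from (foldl_fst _ _ gates _ _).symm]
  set IA := gates.foldl
      (fun (st : List Int × List (Int × Int)) g =>
        (PySem.List.pySetD st.1 g 0, st.2 ++ [(0, g)]))
      (List.replicate (n + 1).toNat 1000000000, ([] : List (Int × Int))) with hIA
  obtain ⟨e1, e2, e3, e4⟩ := initA_good n (buildGraphA n paths) (PySem.Set.ofList gates) gates
    (fun g hg' => ⟨hg g hg', (PySem.Set.mem_ofList gates g).mpr hg'⟩)
  rw [← hIA] at e1 e2 e3 e4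
  have hQ : QInv n (buildGraphA n paths) (PySem.Set.ofList gates) IA.1 IA.2 := by
    intro p hp'
    obtain ⟨q1, q2, q3⟩ := e3 p hp'
    exact ⟨q2.1, q2.2, le_of_eq (by rw [q3, q1])⟩
  have hstab0 : AStab n (buildGraphA n paths) (PySem.Set.ofList summits)
      (PySem.Set.ofList gates) 0 [] IA.1 IA.2 := by
    intro k v c h1 h2 h3 h4
    rcases e4 k h1 with hINF | ⟨h0, g, hgL, hgk, hgm⟩
    · left
      obtain ⟨hv1, hv2, _, _⟩ := goodG_bucket hG _ h3
      have hvL : canonN n v < IA.1.length := by rw [e2.1]; exact canonN_lt n v hv1 hv2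
      have hvb := (e2.2 _ hvL).2
      rw [hINF]
      exact le_trans hvb (le_max_left _ _)
    · right; left
      exact ⟨g, hgL.1, hgL.2, hgk, by rw [h0]; exact hgm⟩
  have hphiA : Phi IA.1 ≤ (n + 1).toNat * 3147483648 := by
    have := phi_le n _ e2
    rw [e2.1] at this
    exact this
  obtain ⟨sA, rA⟩ := loopA_good hG hC
    (gates.length + (n + 1).toNat * 3147483648 + 1) IA.1 IA.2 e2 hQ hstab0 (by omega)
  obtain ⟨sB, rB⟩ := bfLoop_good hG hC hrows hGP IA.1
    ((n + 1).toNat * 3147483648 + 1) IA.1 e2 Relation.ReflTransGen.refl (by omega)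
  have hZ : loopA (buildGraphA n paths) (PySem.Set.ofList gates) (PySem.Set.ofList summits)
        (gates.length + (n + 1).toNat * 3147483648 + 1) IA.1 IA.2
      = bfLoop paths (PySem.Set.ofList gates) (PySem.Set.ofList summits)
        ((n + 1).toNat * 3147483648 + 1) IA.1 :=
    stable_reach_eq e2 rA sA rB sB
  rw [hZ]
  have hpair := foldl_ans_pair
    (bfLoop paths (PySem.Set.ofList gates) (PySem.Set.ofList summits)
      ((n + 1).toNat * 3147483648 + 1) IA.1)
    (PySem.List.sorted summits (fun s => s) false) (1000000000, 1000000000)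
  dsimp only at hpair
  rw [hpair]
  exact answer_eq
    (bfLoop paths (PySem.Set.ofList gates) (PySem.Set.ofList summits)
      ((n + 1).toNat * 3147483648 + 1) IA.1)
    summits
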